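-- pv_equiv track=rewrite | github.com/nyagrodha/aformulationoftruth | questions.py | to_tamil_numeral
-- ===== SOURCE A (Python) =====
-- _TAMIL_DIGITS = "௦௧௨௩௪௫௬௭௮௯"
--
-- def to_tamil_numeral(n: int) -> str:
--     if n == 0:
--         return _TAMIL_DIGITS[0]
--     result = []
--     while n > 0:
--         result.append(_TAMIL_DIGITS[n % 10])
--         n //= 10
--     return "".join(reversed(result))
-- ===== SOURCE B (Python) =====
-- _TAMIL_DIGITS = "௦௧௨௩௪௫௬௭௮௯"
-- _TABLE = str.maketrans("0123456789", _TAMIL_DIGITS)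
--
--
-- def to_tamil_numeral(n: int) -> str:
--     return str(n).translate(_TABLE)
-- ===== Notes on version B (the rewrite author's own statement) =====
-- stated objective: idiomatic
-- what changed: Replaces A's manual modulus/floor-division digit-extraction loop with reversal by a single str(n) conversion mapped through a translation table built once with str.maketrans.
-- intended difference: For negative n A's while-loop never runs and it returns the empty string, an accident of the loop condition; B returns the signed numeral (the minus sign followed by the Tamil digits), which is the intended rendering of a negative number. — e.g. on to_tamil_numeral(-5): A returns "", B returns "-௫"
import Mathlib
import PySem

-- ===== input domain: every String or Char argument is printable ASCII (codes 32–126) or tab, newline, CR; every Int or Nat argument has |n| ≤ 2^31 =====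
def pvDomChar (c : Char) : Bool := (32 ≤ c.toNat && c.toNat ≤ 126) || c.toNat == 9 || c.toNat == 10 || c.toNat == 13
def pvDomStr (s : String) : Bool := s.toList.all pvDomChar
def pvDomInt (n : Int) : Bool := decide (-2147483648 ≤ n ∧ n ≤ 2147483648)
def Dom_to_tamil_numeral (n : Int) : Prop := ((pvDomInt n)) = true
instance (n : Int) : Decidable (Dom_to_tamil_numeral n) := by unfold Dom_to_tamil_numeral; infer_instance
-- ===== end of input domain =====

-- B replaces A's modulus/floor-division digit loop (plus reverse/join) by str(n) mapped
-- through a translation table (str.maketrans), the idiomatic Python way; on negative n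
-- A accidentally returns "" while B returns the signed numeral (stated as D_).


-- ===== PORT A =====
-- _TAMIL_DIGITS = "௦௧௨௩௪௫௬௭௮௯"
def tamilDigits : List Char := ['௦', '௧', '௨', '௩', '௪', '௫', '௬', '௭', '௮', '௯']

-- the while-loop: result.append(_TAMIL_DIGITS[n % 10]); n //= 10
-- (fuel only makes the recursion structural; it is never exhausted when fuel > n;
-- the index n % 10 is always in range 0..9 here, so getD's default is never used)
def toTamilLoop (fuel : Nat) (n : Int) (result : List Char) : List Char :=
  match fuel with
  | 0 => result
  | f + 1 =>
    if 0 < n then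
      toTamilLoop f (PySem.Int.floordiv n 10)
        (result ++ [tamilDigits.getD (PySem.Int.mod n 10).toNat '?'])
    else result

def to_tamil_numeral (n : Int) : String :=
  if n == 0 then String.ofList [tamilDigits.getD 0 '?']
  else String.ofList (toTamilLoop (n.toNat + 1) n []).reverse

-- ===== PORT B =====
-- the translation table str.maketrans("0123456789", _TAMIL_DIGITS), as a char map
def tamilTable (c : Char) : Char :=
  if '0' ≤ c ∧ c ≤ '9' then Char.ofNat (0xBE6 + (c.toNat - '0'.toNat)) else c

-- str(n).translate(_TABLE)
def to_tamil_numeral_alt (n : Int) : String :=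
  String.ofList ((PySem.Int.toChars n).map tamilTable)

-- ===== PRECONDITION & SPEC =====
-- For negative n A's while-loop never runs and it returns the empty string, an accident of
-- the loop condition; B returns the signed numeral (e.g. "-௫" for -5), the intended rendering.
def D_to_tamil_numeral (n : Int) : Prop := n < 0
instance (n : Int) : Decidable (D_to_tamil_numeral n) := by unfold D_to_tamil_numeral; infer_instance
def Spec_to_tamil_numeral (n : Int) (out : String) : Prop := ¬ D_to_tamil_numeral n → out = to_tamil_numeral_alt n
instance (n : Int) (out : String) : Decidable (Spec_to_tamil_numeral n out) := by unfold Spec_to_tamil_numeral; infer_instance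

def pvDiffWitness_to_tamil_numeral : Int := (-5)
def pvDiffWitnessOut_to_tamil_numeral : String × String := ("", "-௫")

-- ===== CLAIM (what is proved, stated in full; the proofs are below) =====
def Claim_unchanged_to_tamil_numeral : Prop := ∀ (n : Int), Dom_to_tamil_numeral n → Spec_to_tamil_numeral n (to_tamil_numeral n)
def Claim_changed_to_tamil_numeral : Prop := Dom_to_tamil_numeral (pvDiffWitness_to_tamil_numeral) ∧ D_to_tamil_numeral (pvDiffWitness_to_tamil_numeral) ∧ to_tamil_numeral (pvDiffWitness_to_tamil_numeral) = pvDiffWitnessOut_to_tamil_numeral.1 ∧ to_tamil_numeral_alt (pvDiffWitness_to_tamil_numeral) = pvDiffWitnessOut_to_tamil_numeral.2 ∧ pvDiffWitnessOut_to_tamil_numeral.1 ≠ pvDiffWitnessOut_to_tamil_numeral.2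
def Claim_exact_to_tamil_numeral : Prop := ∀ (n : Int), Dom_to_tamil_numeral n → D_to_tamil_numeral n → to_tamil_numeral n ≠ to_tamil_numeral_alt n

-- ===== LEMMAS AND PROOFS =====

-- A's digit list (least-significant first), over Nat
def digitsL (m : Nat) : List Char :=
  if m = 0 then [] else tamilDigits.getD (m % 10) '?' :: digitsL (m / 10)

-- the decimal digit characters of m, most-significant first
def msbChars (m : Nat) : List Char :=
  if m < 10 then [Nat.digitChar m] else msbChars (m / 10) ++ [Nat.digitChar (m % 10)]
decreasing_by omega

lemma tamilTable_digitChar (d : Nat) (hd : d < 10) :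
    tamilTable (Nat.digitChar d) = tamilDigits.getD d '?' := by
  interval_cases d <;> decide

lemma toTamilLoop_eq (fuel : Nat) :
    ∀ (n : Int), 0 ≤ n → n.toNat < fuel → ∀ acc,
      toTamilLoop fuel n acc = acc ++ digitsL n.toNat := by
  induction fuel with
  | zero => intro n _ h; omega
  | succ f ih =>
    intro n hn hf acc
    rw [toTamilLoop]
    split_ifs with h
    · have h10 : PySem.Int.floordiv n 10 = n / 10 :=
        PySem.Int.floordiv_eq_ediv_of_pos (by norm_num)
      have hm10 : PySem.Int.mod n 10 = n % 10 :=
        PySem.Int.mod_eq_emod_of_pos (by norm_num)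
      rw [h10, hm10, ih (n / 10) (by omega) (by omega)]
      have h1 : (n % 10).toNat = n.toNat % 10 := by omega
      have h2 : (n / 10).toNat = n.toNat / 10 := by omega
      rw [h1, h2]
      conv_rhs => rw [digitsL]
      rw [if_neg (by omega)]
      simp
    · have : n = 0 := by omega
      subst this
      rw [digitsL]
      simp

lemma toDigitsCore_eq (fuel : Nat) :
    ∀ (m : Nat) (acc : List Char), m < fuel →
      Nat.toDigitsCore 10 fuel m acc = msbChars m ++ acc := by
  induction fuel with
  | zero => intro m acc h; omega
  | succ f ih =>
    intro m acc h
    rw [Nat.toDigitsCore]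
    by_cases h0 : m / 10 = 0
    · rw [if_pos h0, msbChars, if_pos (by omega)]
      have : m % 10 = m := by omega
      rw [this]
      rfl
    · have hlt : m / 10 < f := by omega
      rw [if_neg h0, ih (m / 10) _ hlt]
      conv_rhs => rw [msbChars]
      rw [if_neg (by omega)]
      simp

lemma digitsL_reverse (m : Nat) (hm : 1 ≤ m) :
    (digitsL m).reverse = (msbChars m).map tamilTable := by
  induction m using Nat.strong_induction_on with
  | _ m ih =>
    rw [digitsL, if_neg (by omega), msbChars]
    by_cases h : m < 10
    · rw [if_pos h]
      have h0 : m / 10 = 0 := by omega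
      have h1 : m % 10 = m := by omega
      rw [h0, h1, digitsL]
      simp [tamilTable_digitChar m h]
    · rw [if_neg h]
      simp only [List.reverse_cons, List.map_append, List.map_cons, List.map_nil]
      rw [ih (m / 10) (by omega) (by omega), tamilTable_digitChar (m % 10) (by omega)]

lemma toChars_nonneg (n : Int) (hn : 0 ≤ n) :
    PySem.Int.toChars n = Nat.toDigits 10 n.toNat := by
  rw [PySem.Int.toChars, if_neg (by omega)]

-- ===== VERDICT (by name: the statement is the Claim_ definition above) =====
theorem to_tamil_numeral_spec : Claim_unchanged_to_tamil_numeral := by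
  intro n _ hnd
  have hn : 0 ≤ n := by
    by_contra h
    exact hnd (show D_to_tamil_numeral n by unfold D_to_tamil_numeral; omega)
  by_cases h0 : n = 0
  · subst h0; decide
  · unfold to_tamil_numeral to_tamil_numeral_alt
    rw [if_neg (by simpa using h0)]
    rw [toTamilLoop_eq (n.toNat + 1) n hn (by omega) [], List.nil_append]
    rw [toChars_nonneg n hn, Nat.toDigits,
      toDigitsCore_eq (n.toNat + 1) n.toNat [] (by omega), List.append_nil]
    rw [digitsL_reverse n.toNat (by omega)]

theorem to_tamil_numeral_changed : Claim_changed_to_tamil_numeral := by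
  unfold Claim_changed_to_tamil_numeral
  exact ⟨by decide, by decide, by decide, by decide, by decide⟩

theorem to_tamil_numeral_tight : Claim_exact_to_tamil_numeral := by
  intro n _ hd
  unfold D_to_tamil_numeral at hd
  unfold to_tamil_numeral to_tamil_numeral_alt
  have ht : n.toNat = 0 := by omega
  rw [if_neg (by simp; omega), ht]
  rw [toTamilLoop, toTamilLoop, if_neg (by omega)]
  rw [PySem.Int.toChars, if_pos hd]
  intro h
  have := congrArg String.toList h
  simp at this
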